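-- pv_equiv track=rewrite | github.com/xai770/republic_of_love | archive/legacy/original_archive/codespace_cleanup_20250720/extraction_pipeline/extraction_pipeline/pipeline.py | _summarize_skills_by_category
-- ===== SOURCE A (Python) =====
-- from typing import Dict, List, Any, Optional
--
-- def _summarize_skills_by_category(processed_jobs: List[Dict]) -> Dict[str, int]:
--     """Summarize skills by category
--
--     Args:
--         processed_jobs: List of processed job data
--
--     Returns:
--         Dictionary with skill counts by category
--     """
--     return {
--         "Technical": len([skill for job in processed_jobs
--                        for skill in job.get('technical_requirements', '').split(';') if skill.strip()]),
--         "Business": len([skill for job in processed_jobs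
--                        for skill in job.get('business_requirements', '').split(';') if skill.strip()]),
--         "Soft": len([skill for job in processed_jobs
--                    for skill in job.get('soft_skills', '').split(';') if skill.strip()])
--     }
-- ===== SOURCE B (Python) =====
-- def _scan(s):
--     # streaming state machine: count ';'-delimited segments containing a non-space char,
--     # without building any split/strip intermediate strings
--     n = 0
--     seen = False
--     for ch in s:
--         if ch == ';':
--             if seen:
--                 n += 1
--             seen = False
--         elif not ch.isspace():
--             seen = True
--     if seen:
--         n += 1
--     return n
--
-- def _summarize_skills_by_category(processed_jobs):
--     tech = biz = soft = 0
--     for job in processed_jobs: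
--         tech += _scan(job.get('technical_requirements', ''))
--         biz += _scan(job.get('business_requirements', ''))
--         soft += _scan(job.get('soft_skills', ''))
--     return {"Technical": tech, "Business": biz, "Soft": soft}
-- ===== Notes on version B (the rewrite author's own statement) =====
-- stated objective: alternative
-- what changed: Replaces A's split(';')/strip()/filter/len list-building comprehensions with a single pass over jobs running a character-level streaming state machine per string (one flag: segment has a non-whitespace char), so no substrings or intermediate lists are ever built.
import Mathlib
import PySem

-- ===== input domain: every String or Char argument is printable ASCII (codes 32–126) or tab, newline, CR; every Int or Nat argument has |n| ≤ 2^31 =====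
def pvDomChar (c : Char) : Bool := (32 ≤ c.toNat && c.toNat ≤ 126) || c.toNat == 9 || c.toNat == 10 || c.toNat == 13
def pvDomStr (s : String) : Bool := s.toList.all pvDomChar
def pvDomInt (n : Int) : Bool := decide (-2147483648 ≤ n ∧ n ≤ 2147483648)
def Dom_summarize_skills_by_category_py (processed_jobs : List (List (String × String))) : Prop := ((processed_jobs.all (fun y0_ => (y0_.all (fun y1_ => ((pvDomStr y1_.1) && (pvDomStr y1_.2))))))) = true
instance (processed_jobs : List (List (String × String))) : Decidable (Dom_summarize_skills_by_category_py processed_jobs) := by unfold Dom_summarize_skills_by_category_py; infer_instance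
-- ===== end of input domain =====

-- B replaces A's split/strip/filter list-building comprehensions with one pass running a
-- character-level state machine per string (objective: alternative; no intermediate lists).

-- ===== PORT A =====
-- A-side helper: the comprehension body for one job and one key:
-- job.get(k, '').split(';') filtered by skill.strip() being truthy.
-- split(';') has a non-empty separator, so PySem.Str.split? is always `some`; .getD [] is unreachable.
def pvPieces (job : List (String × String)) (k : String) : List String :=
  ((PySem.Str.split? ((PySem.Dict.mk job).getD k "") ";").getD []).filter
    (fun skill => !(PySem.Str.strip skill == ""))

-- A: three separate comprehensions flattening the filtered pieces over all jobs, then len() of each list.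
def summarize_skills_by_category_py (processed_jobs : List (List (String × String))) : List (String × Int) :=
  [("Technical", ((processed_jobs.flatMap (fun job => pvPieces job "technical_requirements")).length : Int)),
   ("Business", ((processed_jobs.flatMap (fun job => pvPieces job "business_requirements")).length : Int)),
   ("Soft", ((processed_jobs.flatMap (fun job => pvPieces job "soft_skills")).length : Int))]

-- ===== PORT B =====
-- B helper: streaming scan of the characters of s with one Bool of state
-- ("the current segment has a non-whitespace character"); counts segments at each ';' and at the end.
def pvScan (s : String) : Int :=
  let r := s.toList.foldl (fun (st : Int × Bool) ch =>
      if ch == ';' then ((if st.2 then st.1 + 1 else st.1), false)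
      else if !(PySem.Chars.isspace ch) then (st.1, true)
      else (st.1, st.2)) ((0 : Int), false)
  if r.2 then r.1 + 1 else r.1

-- B: one pass over the jobs carrying three integer counters, each fed by the scanner.
def summarize_skills_by_category_py_alt (processed_jobs : List (List (String × String))) : List (String × Int) :=
  let t := processed_jobs.foldl (fun acc job =>
      (acc.1 + pvScan ((PySem.Dict.mk job).getD "technical_requirements" ""),
       acc.2.1 + pvScan ((PySem.Dict.mk job).getD "business_requirements" ""),
       acc.2.2 + pvScan ((PySem.Dict.mk job).getD "soft_skills" ""))) ((0 : Int), (0 : Int), (0 : Int))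
  [("Technical", t.1), ("Business", t.2.1), ("Soft", t.2.2)]

-- ===== PRECONDITION & SPEC =====
def Spec_summarize_skills_by_category_py (processed_jobs : List (List (String × String))) (out : List (String × Int)) : Prop := out = summarize_skills_by_category_py_alt processed_jobs
instance (processed_jobs : List (List (String × String))) (out : List (String × Int)) : Decidable (Spec_summarize_skills_by_category_py processed_jobs out) := by unfold Spec_summarize_skills_by_category_py; infer_instance

-- ===== CLAIM (what is proved, stated in full; the proofs are below) =====
def Claim_equal_summarize_skills_by_category_py : Prop := ∀ (processed_jobs : List (List (String × String))), Dom_summarize_skills_by_category_py processed_jobs → Spec_summarize_skills_by_category_py processed_jobs (summarize_skills_by_category_py processed_jobs)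

-- ===== LEMMAS AND PROOFS =====

-- the predicate "this segment survives strip-filtering": it has a non-whitespace character
def pvNB (seg : List Char) : Bool := !(seg.all PySem.Chars.isspace)

-- PySem's fuel-driven splitOn on a single-character separator is Mathlib's splitOnP
theorem pvGo_single (c : Char) (l : List Char) : ∀ (fuel : Nat) (cur : List Char) (acc : List (List Char)),
    l.length < fuel →
    PySem.Chars.splitOn.go [c] fuel l cur acc
      = acc.reverse ++ (List.splitOnP (· == c) l).modifyHead (cur.reverse ++ ·) := by
  induction l with
  | nil =>
    intro fuel cur acc h
    match fuel with
    | f + 1 => simp [PySem.Chars.splitOn.go, List.splitOnP_nil]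
  | cons x rest ih =>
    intro fuel cur acc h
    match fuel with
    | f + 1 =>
      by_cases hx : x = c
      · subst hx
        have hpre : List.isPrefixOf [x] (x :: rest) = true := by simp [List.isPrefixOf]
        rw [PySem.Chars.splitOn.go, if_pos hpre]
        simp only [List.length_cons, List.length_nil, Nat.zero_add, List.drop_succ_cons,
          List.drop_zero]
        simp only [List.length_cons] at h
        rw [ih f [] (cur.reverse :: acc) (by omega)]
        rcases hs : List.splitOnP (· == x) rest with _ | ⟨h0, t0⟩
        · exact absurd hs (List.splitOnP_ne_nil _ _)
        · simp [List.splitOnP_cons, hs]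
      · have hpre : List.isPrefixOf [c] (x :: rest) = false := by
          simp [List.isPrefixOf]; exact fun hc => absurd hc.symm hx
        rw [PySem.Chars.splitOn.go, if_neg (by simp [hpre])]
        simp only [List.length_cons] at h
        rw [ih f (x :: cur) acc (by omega)]
        rcases hs : List.splitOnP (· == c) rest with _ | ⟨h0, t0⟩
        · exact absurd hs (List.splitOnP_ne_nil _ _)
        · simp [List.splitOnP_cons, hs, beq_iff_eq, hx]
theorem pvSplitOn_single (c : Char) (l : List Char) :
    PySem.Chars.splitOn l [c] = List.splitOnP (· == c) l := by
  rw [PySem.Chars.splitOn, pvGo_single c l (l.length + 1) [] [] (by omega)]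
  rcases hs : List.splitOnP (· == c) l with _ | ⟨h0, t0⟩
  · exact absurd hs (List.splitOnP_ne_nil _ _)
  · simp

-- dropping a satisfied prefix does not change "all elements satisfy p"
theorem pvAll_dropWhile (p : Char → Bool) (l : List Char) :
    (l.dropWhile p).all p = l.all p := by
  induction l with
  | nil => rfl
  | cons x xs ih =>
    by_cases hx : p x = true
    · simp [hx, ih]
    · simp [hx]

-- strip leaves the empty string exactly on all-whitespace input
theorem pvStrip_nil_iff (seg : List Char) :
    (PySem.Chars.strip seg = []) ↔ seg.all PySem.Chars.isspace = true := by
  rw [PySem.Chars.strip, PySem.Chars.rstrip, PySem.Chars.lstrip]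
  rw [List.reverse_eq_nil_iff, List.dropWhile_eq_nil_iff]
  constructor
  · intro h
    rw [← pvAll_dropWhile PySem.Chars.isspace seg, List.all_eq_true]
    intro x hx
    exact h x (by simpa using hx)
  · intro h x hx
    have hall : (seg.dropWhile PySem.Chars.isspace).all PySem.Chars.isspace = true := by
      rw [pvAll_dropWhile]; exact h
    exact (List.all_eq_true.mp hall) x (by simpa using hx)

-- the value of B's scanner state machine, relative to the split segments:
-- pvCnt seen segs = how many more segments the scan will count, given the pending flag
def pvCnt (seen : Bool) (segs : List (List Char)) : Int :=
  match segs with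
  | [] => 0
  | s0 :: rest => (if seen || pvNB s0 then 1 else 0) + (rest.countP pvNB : Int)

theorem pvCnt_false (segs : List (List Char)) (h : segs ≠ []) :
    pvCnt false segs = (segs.countP pvNB : Int) := by
  rcases segs with _ | ⟨s0, rest⟩
  · exact absurd rfl h
  · by_cases h0 : pvNB s0 = true <;> simp [pvCnt, h0] <;> omega

-- the scan loop invariant
theorem pvScan_loop (cs : List Char) : ∀ (n : Int) (seen : Bool),
    (let r := cs.foldl (fun (st : Int × Bool) ch =>
        if ch == ';' then ((if st.2 then st.1 + 1 else st.1), false)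
        else if !(PySem.Chars.isspace ch) then (st.1, true)
        else (st.1, st.2)) (n, seen)
     if r.2 then r.1 + 1 else r.1)
    = n + pvCnt seen (List.splitOnP (· == ';') cs) := by
  induction cs with
  | nil => intro n seen; cases seen <;> simp [pvCnt, List.splitOnP_nil, pvNB]
  | cons x xs ih =>
    intro n seen
    by_cases hx : x = ';'
    · subst hx
      simp only [List.foldl_cons, beq_self_eq_true, if_pos]
      rw [ih (if seen then n + 1 else n) false, List.splitOnP_cons]
      simp only [beq_self_eq_true, if_pos]
      rcases hs : List.splitOnP (· == ';') xs with _ | ⟨h0, t0⟩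
      · exact absurd hs (List.splitOnP_ne_nil _ _)
      · simp only [pvCnt, pvNB, List.all_nil, Bool.not_true, Bool.or_false, Bool.false_or,
          List.countP_cons]
        by_cases h0' : (!h0.all PySem.Chars.isspace) = true <;> cases seen <;>
          simp only [h0', if_true, if_false, Bool.false_eq_true] <;> omega
    · have hxb : (x == ';') = false := by simp [hx]
      simp only [List.foldl_cons, hxb, if_false, Bool.false_eq_true]
      have hstep :
          (if !(PySem.Chars.isspace x) then (n, true) else (n, seen))
            = (n, seen || !(PySem.Chars.isspace x)) := by
        by_cases hsp : PySem.Chars.isspace x = true <;> simp [hsp]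
      rw [hstep, ih n (seen || !(PySem.Chars.isspace x))]
      rcases hs : List.splitOnP (· == ';') xs with _ | ⟨h0, t0⟩
      · exact absurd hs (List.splitOnP_ne_nil _ _)
      · rw [List.splitOnP_cons, hxb]
        simp only [Bool.false_eq_true, if_false, hs, List.modifyHead_cons, pvCnt]
        have : pvNB (x :: h0) = (!(PySem.Chars.isspace x) || pvNB h0) := by
          simp [pvNB, Bool.not_and]
        rw [this]
        by_cases hsp : PySem.Chars.isspace x = true <;>
          by_cases h0' : pvNB h0 = true <;> cases seen <;> simp [hsp, h0']

-- B's scanner equals the length of A's filtered piece list, string by string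
theorem pvScan_eq (job : List (String × String)) (k : String) :
    pvScan ((PySem.Dict.mk job).getD k "") = ((pvPieces job k).length : Int) := by
  set s := (PySem.Dict.mk job).getD k "" with hs
  rw [pvScan, pvPieces]
  rw [pvScan_loop s.toList 0 false]
  rw [PySem.Str.split?]
  have hsep : PySem.Chars.split? s.toList ";".toList
      = some (List.splitOnP (· == ';') s.toList) := by
    rw [PySem.Chars.split?]
    have : (";".toList) = [';'] := rfl
    rw [this]
    simp [pvSplitOn_single]
  rw [hsep]
  simp only [Option.map_some, Option.getD_some]
  rw [pvCnt_false _ (List.splitOnP_ne_nil _ _)]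
  rw [List.filter_map, List.length_map, ← List.countP_eq_length_filter, Int.zero_add]
  congr 1
  apply List.countP_congr
  intro seg _
  have h1 : (PySem.Str.strip (String.ofList seg)).toList = PySem.Chars.strip seg := by
    rw [PySem.Str.toList_strip]; simp
  simp only [Function.comp_apply, pvNB]
  rcases hq : PySem.Chars.strip seg with _ | ⟨y, ys⟩
  · have hall := (pvStrip_nil_iff seg).mp hq
    have hnil : PySem.Str.strip (String.ofList seg) = "" := by
      have h1' : (PySem.Str.strip (String.ofList seg)).toList = [] := by rw [h1, hq]
      cases hgen : PySem.Str.strip (String.ofList seg); simp_all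
    simp [hnil, hall]
  · have hall : ¬ seg.all PySem.Chars.isspace = true := by
      intro hall
      have := (pvStrip_nil_iff seg).mpr hall
      rw [hq] at this; cases this
    have hne : (PySem.Str.strip (String.ofList seg) == "") = false := by
      simp only [beq_eq_false_iff_ne, ne_eq]
      intro he
      rw [he] at h1
      rw [hq] at h1
      cases h1
    simp [hne, hall]

-- the fused fold computes the three flatMap lengths, shifted by the accumulator
theorem pvFoldTriple (jobs : List (List (String × String))) (a b c : Int) :
    jobs.foldl (fun acc job =>
      (acc.1 + pvScan ((PySem.Dict.mk job).getD "technical_requirements" ""),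
       acc.2.1 + pvScan ((PySem.Dict.mk job).getD "business_requirements" ""),
       acc.2.2 + pvScan ((PySem.Dict.mk job).getD "soft_skills" ""))) (a, b, c) =
    (a + ((jobs.flatMap (fun job => pvPieces job "technical_requirements")).length : Int),
     b + ((jobs.flatMap (fun job => pvPieces job "business_requirements")).length : Int),
     c + ((jobs.flatMap (fun job => pvPieces job "soft_skills")).length : Int)) := by
  induction jobs generalizing a b c with
  | nil => simp
  | cons j js ih =>
    rw [List.foldl_cons, ih]
    simp only [List.flatMap_cons, List.length_append, pvScan_eq]
    push_cast
    refine Prod.ext (by ring) (Prod.ext (by ring) (by ring))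

-- ===== VERDICT (by name: the statement is the Claim_ definition above) =====
theorem summarize_skills_by_category_py_spec : Claim_equal_summarize_skills_by_category_py := by
  intro jobs _
  unfold Spec_summarize_skills_by_category_py summarize_skills_by_category_py summarize_skills_by_category_py_alt
  simp [pvFoldTriple]
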